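-- pv_equiv track=rewrite | github.com/gusony/ML_HW | 1/hw1.py | one_row_product
-- ===== SOURCE A (Python) =====
-- def one_row_product(data_array, order): # each X product []
-- #return : [1,x1,x2,x3,  x1x1,x1x2,...,x3x3,  x1x1x1,x1x1x2...,x3x3x3]
--   result = [1]
--   if order >=1:
--     for i in data_array:
--       result.append(i)
--   if order >= 2:
--     for i in data_array:
--       for j in data_array:
--         result.append(i*j)
--   if order >= 3:
--     for i in data_array:
--       for j in data_array:
--         for k in data_array:
--           result.append(i*j*k)
--   return (result)
-- ===== SOURCE B (Python) =====
-- def one_row_product(data_array, order):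
--     # DP layering: degree-d terms are (degree-(d-1) terms) x data_array
--     result = [1]
--     layer = [1]
--     for _ in range(1, min(order, 3) + 1):
--         layer = [p * x for p in layer for x in data_array]
--         result += layer
--     return result
-- ===== Notes on version B (the rewrite author's own statement) =====
-- stated objective: alternative
-- what changed: Replaces the three hand-written nested-loop blocks by a single degree-driven loop that builds each degree's terms as the cartesian extension of the previous degree's layer (dynamic-programming layering).
import Mathlib
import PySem

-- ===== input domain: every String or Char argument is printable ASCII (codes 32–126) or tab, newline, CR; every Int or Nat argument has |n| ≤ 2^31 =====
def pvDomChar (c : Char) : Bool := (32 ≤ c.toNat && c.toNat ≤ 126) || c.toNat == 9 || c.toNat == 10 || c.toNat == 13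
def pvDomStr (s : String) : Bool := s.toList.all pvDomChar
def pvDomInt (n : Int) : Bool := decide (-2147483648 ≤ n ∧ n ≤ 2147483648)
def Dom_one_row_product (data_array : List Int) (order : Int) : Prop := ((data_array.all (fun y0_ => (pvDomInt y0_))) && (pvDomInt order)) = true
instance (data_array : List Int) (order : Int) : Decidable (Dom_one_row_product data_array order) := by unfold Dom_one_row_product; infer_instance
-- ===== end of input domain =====

-- B replaces A's three hand-written degree blocks by one degree-driven loop that
-- extends the previous degree's layer (alternative decomposition; same asymptotic cost).
-- ===== PORT A =====
def one_row_product (data_array : List Int) (order : Int) : List Int :=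
  let result := [1]
  let result := if order ≥ 1 then
      data_array.foldl (fun r i => r ++ [i]) result
    else result
  let result := if order ≥ 2 then
      data_array.foldl (fun r i =>
        data_array.foldl (fun r j => r ++ [i * j]) r) result
    else result
  let result := if order ≥ 3 then
      data_array.foldl (fun r i =>
        data_array.foldl (fun r j =>
          data_array.foldl (fun r k => r ++ [i * j * k]) r) r) result
    else result
  result

-- ===== PORT B =====
-- one iteration of Source B's loop body: extend the layer, append it to the result
def altStep (data_array : List Int) (st : List Int × List Int) (_d : Int) : List Int × List Int :=
  let layer := st.2.flatMap (fun p => data_array.map (fun x => p * x))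
  (st.1 ++ layer, layer)

def one_row_product_alt (data_array : List Int) (order : Int) : List Int :=
  ((PySem.List.pyRange 1 (min order 3 + 1) 1).foldl (altStep data_array) ([1], [1])).1

-- ===== PRECONDITION & SPEC =====
def Spec_one_row_product (data_array : List Int) (order : Int) (out : List Int) : Prop := out = one_row_product_alt data_array order
instance (data_array : List Int) (order : Int) (out : List Int) : Decidable (Spec_one_row_product data_array order out) := by unfold Spec_one_row_product; infer_instance

-- ===== CLAIM (what is proved, stated in full; the proofs are below) =====
def Claim_equal_one_row_product : Prop := ∀ (data_array : List Int) (order : Int), Dom_one_row_product data_array order → Spec_one_row_product data_array order (one_row_product data_array order)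

-- ===== LEMMAS AND PROOFS =====

-- ===== VERDICT (by name: the statement is the Claim_ definition above) =====
lemma pyRange_low (o : Int) (h : o ≤ 0) : PySem.List.pyRange 1 (o + 1) 1 = [] := by
  unfold PySem.List.pyRange; simp; omega

theorem one_row_product_spec : Claim_equal_one_row_product := by
  intro data_array order _
  unfold Spec_one_row_product one_row_product one_row_product_alt
  by_cases h0 : order ≤ 0
  · rw [min_eq_left (by omega : order ≤ 3), pyRange_low order h0]
    simp [show ¬ order ≥ 1 by omega, show ¬ order ≥ 2 by omega, show ¬ order ≥ 3 by omega]
  · by_cases h1 : order < 2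
    · have : order = 1 := by omega
      subst this
      norm_num [PySem.List.foldl_append_singleton, altStep,
        ← List.flatMap_def, List.flatMap_singleton',
        show PySem.List.pyRange 1 2 1 = [1] from by decide]
    · by_cases h2 : order < 3
      · have : order = 2 := by omega
        subst this
        simp only [show (min (2:Int) 3 + 1) = 3 from by decide,
          show PySem.List.pyRange 1 3 1 = [1, 2] from by decide]
        norm_num [PySem.List.foldl_append_singleton, PySem.List.foldl_append_eq_flatMap,
          altStep, List.foldl_cons, List.foldl_nil, ← List.flatMap_def,
          List.flatMap_singleton', ← List.map_eq_flatMap, List.flatMap_map, Function.comp]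
      · rw [min_eq_right (by omega : (3:Int) ≤ order),
          show PySem.List.pyRange 1 (3 + 1) 1 = [1, 2, 3] from by decide]
        simp only [show order ≥ 1 from by omega, show order ≥ 2 from by omega,
          show order ≥ 3 from by omega, if_pos]
        norm_num [PySem.List.foldl_append_singleton, PySem.List.foldl_append_eq_flatMap,
          altStep, List.foldl_cons, List.foldl_nil, ← List.flatMap_def,
          List.flatMap_singleton', ← List.map_eq_flatMap, List.flatMap_map, List.flatMap_assoc, List.map_map,
          Function.comp, mul_assoc]
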